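-- pv_equiv track=rewrite | github.com/darricktheprogrammer/MultiComma | multicomma/manipulations.py | add_comma_to_line
-- ===== SOURCE A (Python) =====
-- def add_comma_to_line(txt, characters_to_prepend=" ]}),"):
-- 	for i in range(len(txt), 0, -1):
-- 		char_idx = i - 1
-- 		char = txt[char_idx]
-- 		if char not in characters_to_prepend:
-- 			try:
-- 				next_char = txt[char_idx + 1]
-- 			except IndexError:
-- 				next_char = None
-- 			if not txt.endswith(",") and next_char != ",":
-- 				txt = txt[: char_idx + 1] + "," + txt[char_idx + 1 :]
-- 			break
-- 	return txt
-- ===== SOURCE B (Python) =====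
-- def add_comma_to_line(txt, characters_to_prepend=" ]}),"):
--     if txt.endswith(","):
--         return txt
--     pos = 0
--     for i, char in enumerate(txt):
--         if char not in characters_to_prepend:
--             pos = i + 1
--     if pos == 0:
--         return txt
--     if pos < len(txt) and txt[pos] == ",":
--         return txt
--     return txt[:pos] + "," + txt[pos:]
-- ===== Notes on version B (the rewrite author's own statement) =====
-- stated objective: simpler
-- what changed: A scans backward from the end with an explicit index loop, try/except and break, mutating txt in place; B first returns early on a trailing comma, then makes one forward pass over enumerate(txt) keeping the insertion position in an accumulator, and does a single slice-insert at the end.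
import Mathlib
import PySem

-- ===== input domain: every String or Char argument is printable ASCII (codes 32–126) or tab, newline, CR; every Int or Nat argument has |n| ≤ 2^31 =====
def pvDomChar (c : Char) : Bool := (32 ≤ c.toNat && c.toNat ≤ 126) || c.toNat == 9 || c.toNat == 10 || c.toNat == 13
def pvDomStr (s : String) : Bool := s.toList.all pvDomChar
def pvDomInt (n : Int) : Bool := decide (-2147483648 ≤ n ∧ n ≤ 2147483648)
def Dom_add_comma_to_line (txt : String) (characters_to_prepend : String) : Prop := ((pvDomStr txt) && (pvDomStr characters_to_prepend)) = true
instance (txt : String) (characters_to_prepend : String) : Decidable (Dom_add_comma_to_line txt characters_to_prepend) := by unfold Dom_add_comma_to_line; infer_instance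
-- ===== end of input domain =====

-- B replaces A's reverse scan-with-break (try/except for the next char) by an early
-- trailing-comma return plus ONE FORWARD pass over enumerate(txt) that keeps the
-- insertion position in an accumulator; objective: simpler.


-- ===== PORT A =====
-- the for-loop: i runs len(txt), len(txt)-1, …, 1; char_idx = i-1; break returns the value
def pvLoopA (txt cs : List Char) : Nat → List Char
  | 0 => txt
  | Nat.succ k =>
    match PySem.List.pyGet? txt (k : Int) with      -- char = txt[char_idx] (always in range here)
    | none => txt
    | some char =>
      if char ∈ cs then pvLoopA txt cs k
      else
        -- try: next_char = txt[char_idx+1] except IndexError: next_char = None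
        let next_char := PySem.List.pyGet? txt ((k : Int) + 1)
        if ¬ (PySem.Chars.endswith txt [','] = true) ∧ next_char ≠ some ',' then
          PySem.List.slice txt none (some ((k : Int) + 1)) ++ [','] ++
            PySem.List.slice txt (some ((k : Int) + 1)) none
        else txt

def add_comma_to_line (txt : String) (characters_to_prepend : String) : String :=
  String.ofList (pvLoopA txt.toList characters_to_prepend.toList txt.toList.length)

-- ===== PORT B =====
-- pos = 0; for i, char in enumerate(txt): if char not in cs: pos = i + 1
def pvPosB (l cs : List Char) : Int :=
  (PySem.List.enumerate l).foldl (fun pos p => if p.2 ∈ cs then pos else p.1 + 1) 0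

def pvAltCore (l cs : List Char) : List Char :=
  if PySem.Chars.endswith l [','] = true then l        -- if txt.endswith(","): return txt
  else
    let pos := pvPosB l cs
    if pos = 0 then l                                   -- if pos == 0: return txt
    -- if pos < len(txt) and txt[pos] == ",": return txt   (pos ≥ 0 here, so pyGet? is exact)
    else if pos < (l.length : Int) ∧ PySem.List.pyGet? l pos = some ',' then l
    -- return txt[:pos] + "," + txt[pos:]
    else PySem.List.slice l none (some pos) ++ [','] ++ PySem.List.slice l (some pos) none

def add_comma_to_line_alt (txt : String) (characters_to_prepend : String) : String :=
  String.ofList (pvAltCore txt.toList characters_to_prepend.toList)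

-- ===== PRECONDITION & SPEC =====
def Spec_add_comma_to_line (txt : String) (characters_to_prepend : String) (out : String) : Prop := out = add_comma_to_line_alt txt characters_to_prepend
instance (txt : String) (characters_to_prepend : String) (out : String) : Decidable (Spec_add_comma_to_line txt characters_to_prepend out) := by unfold Spec_add_comma_to_line; infer_instance

-- ===== CLAIM (what is proved, stated in full; the proofs are below) =====
def Claim_equal_add_comma_to_line : Prop := ∀ (txt : String) (characters_to_prepend : String), Dom_add_comma_to_line txt characters_to_prepend → Spec_add_comma_to_line txt characters_to_prepend (add_comma_to_line txt characters_to_prepend)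

-- ===== LEMMAS AND PROOFS =====

-- proof-only helper: the trailing run of cs-characters removed (what B's pos points past)
def pvRstrip (l cs : List Char) : List Char :=
  (l.reverse.dropWhile (fun c => decide (c ∈ cs))).reverse

theorem pvRstrip_append_mem (l cs : List Char) (c : Char) (h : c ∈ cs) :
    pvRstrip (l ++ [c]) cs = pvRstrip l cs := by
  unfold pvRstrip
  rw [List.reverse_append, List.reverse_singleton, List.singleton_append,
    List.dropWhile_cons_of_pos (by simpa using h)]

theorem pvRstrip_append_not_mem (l cs : List Char) (c : Char) (h : c ∉ cs) :
    pvRstrip (l ++ [c]) cs = l ++ [c] := by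
  unfold pvRstrip
  rw [List.reverse_append, List.reverse_singleton, List.singleton_append,
    List.dropWhile_cons_of_neg (by simpa using h)]
  simp

theorem pvPosB_eq (l cs : List Char) : pvPosB l cs = ((pvRstrip l cs).length : Int) := by
  induction l using List.reverseRecOn with
  | nil => rfl
  | append_singleton m c ih =>
    unfold pvPosB
    rw [PySem.List.enumerate_append, List.foldl_append]
    have h1 : PySem.List.enumerate [c] (0 + (m.length : Int)) = [((m.length : Int), c)] := by
      rw [PySem.List.enumerate_cons, PySem.List.enumerate_nil]
      norm_num
    rw [h1]
    by_cases hc : c ∈ cs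
    · rw [pvRstrip_append_mem m cs c hc]
      simpa [hc] using ih
    · rw [pvRstrip_append_not_mem m cs c hc]
      simp [hc]

theorem pvRstrip_all (l cs : List Char) (h : ∀ c ∈ l, c ∈ cs) : pvRstrip l cs = [] := by
  unfold pvRstrip
  rw [List.dropWhile_eq_nil_iff.2]
  · rfl
  · intro c hc
    simp only [decide_eq_true_eq]
    exact h c (List.mem_reverse.1 hc)

theorem pvRstrip_stop (l cs : List Char) (k : Nat) (hk : k < l.length)
    (hc : l[k] ∉ cs) (hall : ∀ c ∈ l.drop (k + 1), c ∈ cs) :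
    pvRstrip l cs = l.take (k + 1) := by
  have hdecomp : l.reverse = (l.drop (k + 1)).reverse ++ l[k] :: (l.take k).reverse := by
    conv_lhs => rw [← List.take_append_drop (k + 1) l]
    rw [List.reverse_append]
    congr 1
    rw [List.take_add_one, List.getElem?_eq_getElem hk]
    simp
  unfold pvRstrip
  rw [hdecomp, List.dropWhile_append]
  have h1 : (l.drop (k + 1)).reverse.dropWhile (fun c => decide (c ∈ cs)) = [] := by
    rw [List.dropWhile_eq_nil_iff.2]
    intro c hc'
    simp only [decide_eq_true_eq]
    exact hall c (List.mem_reverse.1 hc')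
  rw [h1]
  simp only [List.isEmpty_nil, if_true]
  rw [List.dropWhile_cons_of_neg (by simpa using hc)]
  rw [List.reverse_cons, List.reverse_reverse, List.take_add_one,
    List.getElem?_eq_getElem hk]
  simp

theorem pvLoopA_eq (l cs : List Char) (i : Nat) (hi : i ≤ l.length)
    (hall : ∀ c ∈ l.drop i, c ∈ cs) : pvLoopA l cs i = pvAltCore l cs := by
  induction i with
  | zero =>
    have hstrip : pvRstrip l cs = [] := pvRstrip_all l cs (by simpa using hall)
    have hpos : pvPosB l cs = 0 := by rw [pvPosB_eq, hstrip]; rfl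
    simp [pvLoopA, pvAltCore, hpos]
  | succ k ih =>
    have hk : k < l.length := hi
    have hget : PySem.List.pyGet? l (k : Int) = some l[k] := by
      simp [PySem.List.pyGet?, PySem.List.pyIdx?, hk]
    rw [pvLoopA, hget]
    dsimp only
    by_cases hmem : l[k] ∈ cs
    · rw [if_pos hmem]
      apply ih (le_of_lt hk)
      intro c hc
      have : l.drop k = l[k] :: l.drop (k + 1) := by
        rw [List.drop_eq_getElem_cons hk]
      rw [this, List.mem_cons] at hc
      rcases hc with rfl | h
      · exact hmem
      · exact hall c h
    · rw [if_neg hmem]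
      have hstrip : pvRstrip l cs = l.take (k + 1) := pvRstrip_stop l cs k hk hmem hall
      have hpos : pvPosB l cs = ((k + 1 : Nat) : Int) := by
        rw [pvPosB_eq, hstrip, List.length_take]
        congr 1
        omega
      have hnat : ((k : Int) + 1) = ((k + 1 : Nat) : Int) := by push_cast; ring
      unfold pvAltCore
      by_cases hend : PySem.Chars.endswith l [','] = true
      · rw [if_pos hend]
        rw [if_neg (by simp [hend])]
      · rw [if_neg hend]
        rw [hpos]
        have hc0 : ¬((k + 1 : Nat) : Int) = 0 := by exact_mod_cast Nat.succ_ne_zero k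
        have hnext : PySem.List.pyGet? l ((k : Int) + 1) = l[k + 1]? := by
          rw [hnat, PySem.List.pyGet?_natCast]
        have hcond : (((k + 1 : Nat) : Int) < (l.length : Int) ∧
            PySem.List.pyGet? l ((k + 1 : Nat) : Int) = some ',') ↔
            l[k + 1]? = some ',' := by
          rw [PySem.List.pyGet?_natCast]
          constructor
          · exact fun h => h.2
          · intro h
            refine ⟨?_, h⟩
            have hlt : k + 1 < l.length := by
              by_contra hge
              rw [List.getElem?_eq_none (by omega)] at h
              simp at h
            exact_mod_cast hlt
        rw [if_neg hc0]
        by_cases hnc : l[k + 1]? = some ','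
        · rw [if_pos (hcond.2 hnc), if_neg (by simp [hnext, hnc])]
        · rw [if_neg (fun h => hnc (hcond.1 h)),
            if_pos (show _ ∧ _ from ⟨hend, by simpa [hnext] using hnc⟩), hnat]

-- ===== VERDICT (by name: the statement is the Claim_ definition above) =====
theorem add_comma_to_line_spec : Claim_equal_add_comma_to_line := by
  intro txt cs _
  unfold Spec_add_comma_to_line add_comma_to_line add_comma_to_line_alt
  congr 1
  exact pvLoopA_eq txt.toList cs.toList txt.toList.length le_rfl
    (by rw [List.drop_length]; intro c hc; cases hc)
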